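-- pv_equiv track=rewrite | github.com/shuangpe/cutlass | scripts/cutlass_profiler/python/process_cutlass_profiler_perf.py | generate_output_columns
-- ===== SOURCE A (Python) =====
-- from typing import List, Dict, Tuple, Optional, Any
--
-- def generate_output_columns(all_data: List[Dict[str, str]]) -> List[str]:
--     """Generate column names for output CSV, with new columns at the left, all original columns preserved"""
--     if not all_data:
--         return []
--     # New column order
--     new_columns = [
--         'TFLOPs', 'GPUFreq', 'DataTypes',
--         'ProblemShape', 'CtaShape', 'ClusterShape', 'WarpsShape', 'InstructShape', 'StreamK', 'GemmKind'
--     ]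
--     # Collect all encountered fields
--     all_keys = []
--     for row in all_data:
--         for k in row.keys():
--             if k not in all_keys:
--                 all_keys.append(k)
--     # New columns first, then the rest of the original fields in order
--     output_columns = [col for col in new_columns if col in all_keys]
--     output_columns += [k for k in all_keys if k not in output_columns]
--     return output_columns
-- ===== SOURCE B (Python) =====
-- def generate_output_columns(all_data):
--     """Rank-then-sort: dedup keys once, assign each a numeric rank (position in
--     new_columns if it is a new column, else len(new_columns) + encounter index),
--     and sort the distinct keys by that rank."""
--     new_columns = [
--         'TFLOPs', 'GPUFreq', 'DataTypes',
--         'ProblemShape', 'CtaShape', 'ClusterShape', 'WarpsShape', 'InstructShape', 'StreamK', 'GemmKind'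
--     ]
--     keys = list(dict.fromkeys(k for row in all_data for k in row))
--     rank = {}
--     for i, k in enumerate(keys):
--         rank[k] = new_columns.index(k) if k in new_columns else len(new_columns) + i
--     return sorted(keys, key=rank.__getitem__)
-- ===== Notes on version B (the rewrite author's own statement) =====
-- stated objective: faster
-- what changed: B replaces A's incremental dedup-by-list-scan plus two filtering passes with a rank-then-sort strategy: dedup the keys once, build a numeric rank table (new-column position, or len(new_columns)+encounter index), and sort the distinct keys by rank.
import Mathlib
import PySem

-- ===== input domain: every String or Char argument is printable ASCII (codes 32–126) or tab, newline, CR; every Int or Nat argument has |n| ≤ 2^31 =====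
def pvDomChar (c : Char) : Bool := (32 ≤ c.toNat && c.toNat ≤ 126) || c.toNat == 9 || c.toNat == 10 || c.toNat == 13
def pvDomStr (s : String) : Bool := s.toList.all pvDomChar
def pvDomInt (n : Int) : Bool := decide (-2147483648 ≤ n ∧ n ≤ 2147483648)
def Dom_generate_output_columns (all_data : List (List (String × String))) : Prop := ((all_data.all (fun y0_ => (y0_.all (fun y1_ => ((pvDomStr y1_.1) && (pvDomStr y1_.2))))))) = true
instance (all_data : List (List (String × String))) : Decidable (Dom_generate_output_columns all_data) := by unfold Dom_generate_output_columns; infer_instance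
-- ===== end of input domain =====

-- B replaces A's incremental dedup-by-list-scan and two filtering passes with a
-- rank-then-sort strategy (dedup once, numeric rank table, stable sort by rank); objective: faster.


def gocNewColumns : List String :=
  ["TFLOPs", "GPUFreq", "DataTypes",
   "ProblemShape", "CtaShape", "ClusterShape", "WarpsShape", "InstructShape", "StreamK", "GemmKind"]

-- ===== PORT A =====
def generate_output_columns (all_data : List (List (String × String))) : List String :=
  if all_data = [] then []
  else
    let new_columns := gocNewColumns
    -- for row in all_data: for k in row.keys(): if k not in all_keys: all_keys.append(k)
    let all_keys := all_data.foldl (fun acc row =>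
      (PySem.Dict.ofList row).keys.foldl
        (fun acc k => if acc.contains k then acc else acc ++ [k]) acc) []
    let output_columns := new_columns.filter (fun col => all_keys.contains col)
    output_columns ++ all_keys.filter (fun k => !(output_columns.contains k))

-- ===== PORT B =====
-- rank[k] = new_columns.index(k) if k in new_columns else len(new_columns) + i
-- (the `.getD 0` is never used: index? is `some` exactly when the contains-guard holds)
def gocRank (keys : List String) : PySem.Dict String Int :=
  (PySem.List.enumerate keys).foldl
    (fun d p => d.insert p.2
      (if gocNewColumns.contains p.2
       then (((PySem.List.index? gocNewColumns p.2).getD 0 : Nat) : Int)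
       else (gocNewColumns.length : Int) + p.1))
    PySem.Dict.empty

def generate_output_columns_alt (all_data : List (List (String × String))) : List String :=
  -- keys = list(dict.fromkeys(k for row in all_data for k in row))
  let keys := PySem.List.dedup (all_data.flatMap (fun row => (PySem.Dict.ofList row).keys))
  let rank := gocRank keys
  -- rank.__getitem__ never raises: every sorted element is a key of rank, so getD is exact
  PySem.List.sorted keys (fun k => rank.getD k 0) false

-- ===== PRECONDITION & SPEC =====
def Spec_generate_output_columns (all_data : List (List (String × String))) (out : List String) : Prop := out = generate_output_columns_alt all_data
instance (all_data : List (List (String × String))) (out : List String) : Decidable (Spec_generate_output_columns all_data out) := by unfold Spec_generate_output_columns; infer_instance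

-- ===== CLAIM (what is proved, stated in full; the proofs are below) =====
def Claim_equal_generate_output_columns : Prop := ∀ (all_data : List (List (String × String))), Dom_generate_output_columns all_data → Spec_generate_output_columns all_data (generate_output_columns all_data)

-- ===== LEMMAS AND PROOFS =====

-- the rank a member of `keys` receives from the gocRank dict
def gocRankFn (keys : List String) (k : String) : Int :=
  if gocNewColumns.contains k then (gocNewColumns.idxOf k : Int)
  else (gocNewColumns.length : Int) + (keys.idxOf k : Int)

theorem idxOf?_of_mem (L : List String) (k : String) (h : k ∈ L) : L.idxOf? k = some (L.idxOf k) := by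
  have h1 := List.idxOf?_eq_none_iff (l := L) (a := k)
  have h2 := List.idxOf_eq_getD_idxOf? (a := k) (l := L)
  cases hc : L.idxOf? k with
  | none => rw [hc] at h1; exact absurd (h1.mp rfl) (by simpa using h)
  | some i => rw [hc] at h2; simp at h2; rw [h2]

-- gocRank's loop inserts each distinct key once, so a lookup yields the rank formula
theorem gocRank_getD (keys : List String) (hnd : keys.Nodup) (k : String) (hk : k ∈ keys) :
    (gocRank keys).getD k 0 = gocRankFn keys k := by
  have hitems := PySem.Dict.items_foldl_insert_fresh
    (l := PySem.List.enumerate keys) (k := fun p => p.2)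
    (v := fun p => (if gocNewColumns.contains p.2
       then (((PySem.List.index? gocNewColumns p.2).getD 0 : Nat) : Int)
       else (gocNewColumns.length : Int) + p.1))
    (d := PySem.Dict.empty)
    (by intro a _; exact PySem.Dict.contains_empty _)
    (by rw [PySem.List.map_snd_enumerate]; exact hnd)
  have hi : keys.idxOf k < keys.length := List.idxOf_lt_length_of_mem hk
  have hmem : ((0 : Int) + (keys.idxOf k : Int), keys[keys.idxOf k]) ∈ PySem.List.enumerate keys := by
    rw [PySem.List.mem_enumerate_iff]
    exact ⟨keys.idxOf k, hi, rfl⟩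
  rw [List.getElem_idxOf hi] at hmem
  have hpair : (k, gocRankFn keys k) ∈ (gocRank keys).items := by
    unfold gocRank
    rw [hitems]
    rw [show (PySem.Dict.empty : PySem.Dict String Int).items = [] from rfl, List.nil_append]
    refine List.mem_map.mpr ⟨((0 : Int) + (keys.idxOf k : Int), k), hmem, ?_⟩
    unfold gocRankFn
    simp only [PySem.List.index?_eq_idxOf?]
    by_cases h : k ∈ gocNewColumns
    · rw [idxOf?_of_mem _ _ h]
      simp [h]
    · simp [h]
  have hknd : (gocRank keys).keys.Nodup := by
    unfold gocRank
    exact PySem.Dict.nodup_keys_foldl_insert_key _ _ _ _ (by simp)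
  exact PySem.Dict.getD_of_mem_items _ hpair hknd 0

-- A's dedup loop is Set.ofList of the flattened key stream (= PySem.List.dedup)
theorem gocKeysA_eq (all_data : List (List (String × String))) :
    all_data.foldl (fun acc row =>
      (PySem.Dict.ofList row).keys.foldl
        (fun acc k => if acc.contains k then acc else acc ++ [k]) acc) [] =
    PySem.List.dedup (all_data.flatMap (fun row => (PySem.Dict.ofList row).keys)) := by
  simp only [PySem.List.dedup_eq_ofList, PySem.Set.ofList_eq_foldl, ← List.foldl_flatMap]
  rfl

-- a nodup list is strictly increasing in its own idxOf
theorem pairwise_idxOf_lt (L : List String) (h : L.Nodup) :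
    L.Pairwise (fun a b => L.idxOf a < L.idxOf b) := by
  rw [List.pairwise_iff_getElem]
  intro i j hi hj hij
  rw [h.idxOf_getElem, h.idxOf_getElem]; omega

-- A's output is a strictly rank-increasing rearrangement of keys, hence sorted(keys, rank)
theorem goc_main (keys : List String) (hnd : keys.Nodup) :
    gocNewColumns.filter (fun col => keys.contains col) ++
      keys.filter (fun k => !((gocNewColumns.filter (fun col => keys.contains col)).contains k)) =
    PySem.List.sorted keys (fun k => (gocRank keys).getD k 0) false := by
  have hnc : gocNewColumns.Nodup := by decide
  have hothers : keys.filter (fun k => !((gocNewColumns.filter (fun col => keys.contains col)).contains k))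
      = keys.filter (fun k => !(gocNewColumns.contains k)) := by
    apply List.filter_congr
    intro k hk
    simp [List.mem_filter, hk]
  rw [hothers]
  have hP : (gocNewColumns.filter (fun col => keys.contains col)).Perm
      (keys.filter (fun k => gocNewColumns.contains k)) := by
    refine (List.perm_ext_iff_of_nodup (hnc.filter _) (hnd.filter _)).mpr ?_
    intro a
    simp only [List.mem_filter, List.contains_eq_mem, decide_eq_true_eq]
    tauto
  have hperm : (gocNewColumns.filter (fun col => keys.contains col) ++
      keys.filter (fun k => !(gocNewColumns.contains k))).Perm keys := by
    refine (hP.append_right _).trans ?_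
    exact List.filter_append_perm _ keys
  -- rank formula values pairwise-increasing along the concatenation
  have hpairFn : (gocNewColumns.filter (fun col => keys.contains col) ++
      keys.filter (fun k => !(gocNewColumns.contains k))).Pairwise
      (fun a b => gocRankFn keys a < gocRankFn keys b) := by
    rw [List.pairwise_append]
    refine ⟨?_, ?_, ?_⟩
    · have h1 := (pairwise_idxOf_lt _ hnc).sublist (List.filter_sublist (l := gocNewColumns)
        (p := fun col => keys.contains col))
      refine h1.imp_of_mem ?_
      intro a b ha hb hab
      have ha' : a ∈ gocNewColumns := (List.mem_filter.mp ha).1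
      have hb' : b ∈ gocNewColumns := (List.mem_filter.mp hb).1
      simp only [gocRankFn, List.contains_eq_mem, ha', hb', decide_true, if_true]
      exact_mod_cast hab
    · have h1 := (pairwise_idxOf_lt _ hnd).sublist (List.filter_sublist (l := keys)
        (p := fun k => !(gocNewColumns.contains k)))
      refine h1.imp_of_mem ?_
      intro a b ha hb hab
      have ha' : a ∉ gocNewColumns := by
        have := (List.mem_filter.mp ha).2; simpa using this
      have hb' : b ∉ gocNewColumns := by
        have := (List.mem_filter.mp hb).2; simpa using this
      simp only [gocRankFn, List.contains_eq_mem, ha', hb', decide_false]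
      simp only [Bool.false_eq_true, if_false]
      omega
    · intro a ha b hb
      have ha' : a ∈ gocNewColumns := (List.mem_filter.mp ha).1
      have hb' : b ∉ gocNewColumns := by
        have := (List.mem_filter.mp hb).2; simpa using this
      have hlt : gocNewColumns.idxOf a < gocNewColumns.length := List.idxOf_lt_length_of_mem ha'
      simp only [gocRankFn, List.contains_eq_mem, ha', hb', decide_true, decide_false]
      simp only [if_true, Bool.false_eq_true, if_false]
      have : (0:Int) ≤ (keys.idxOf b : Int) := by positivity
      omega
  -- convert to the dict-lookup key and name the sorted order
  refine (PySem.List.sorted_eq_of_perm_of_pairwise_lt _ _ _ hperm ?_).symm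
  refine hpairFn.imp_of_mem ?_
  intro a b ha hb hab
  have hb' : b ∈ keys := hperm.mem_iff.mp hb
  rw [gocRank_getD keys hnd a (hperm.mem_iff.mp ha), gocRank_getD keys hnd b hb']
  exact hab

-- ===== VERDICT (by name: the statement is the Claim_ definition above) =====
theorem generate_output_columns_spec : Claim_equal_generate_output_columns := by
  intro all_data _
  show generate_output_columns all_data = generate_output_columns_alt all_data
  unfold generate_output_columns generate_output_columns_alt
  rw [gocKeysA_eq]
  by_cases hnil : all_data = []
  · subst hnil; rfl
  · simp only [hnil, if_false]
    exact goc_main _ (by simp [PySem.List.dedup_eq_ofList, PySem.Set.nodup_ofList])
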